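-- pv_equiv track=rewrite | github.com/smarr/ReBench | rebench/model/exp_run_details.py | _lt_of_env_dict
-- ===== SOURCE A (Python) =====
-- def _lt_of_env_dict(a: dict, b: dict):
--     assert a != b
--
--     if len(a) != len(b):
--         return len(a) < len(b)
--
--     for k in sorted(a.keys()):
--         if k not in b:
--             return True
--
--         if a[k] != b[k]:
--             return a[k] < b[k]
--
--     # This case should never be reached, because we already checked for equality
--     assert False, "Unexpected case reached in _lt_of_env_dict"
-- ===== SOURCE B (Python) =====
-- def _lt_of_env_dict(a: dict, b: dict):
--     assert a != b
--
--     if len(a) != len(b):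
--         return len(a) < len(b)
--
--     # the first distinguishing key under string order, found by a single
--     # min-selection pass instead of sorting all keys
--     k = min(k for k in a if k not in b or a[k] != b[k])
--     return True if k not in b else a[k] < b[k]
-- ===== Notes on version B (the rewrite author's own statement) =====
-- stated objective: alternative
-- what changed: Replaces the sort-all-keys-then-scan loop by a single min-selection pass over the distinguishing keys (keys missing from b or mapped to a different value), returning the verdict for that minimal key directly.
import Mathlib
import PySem

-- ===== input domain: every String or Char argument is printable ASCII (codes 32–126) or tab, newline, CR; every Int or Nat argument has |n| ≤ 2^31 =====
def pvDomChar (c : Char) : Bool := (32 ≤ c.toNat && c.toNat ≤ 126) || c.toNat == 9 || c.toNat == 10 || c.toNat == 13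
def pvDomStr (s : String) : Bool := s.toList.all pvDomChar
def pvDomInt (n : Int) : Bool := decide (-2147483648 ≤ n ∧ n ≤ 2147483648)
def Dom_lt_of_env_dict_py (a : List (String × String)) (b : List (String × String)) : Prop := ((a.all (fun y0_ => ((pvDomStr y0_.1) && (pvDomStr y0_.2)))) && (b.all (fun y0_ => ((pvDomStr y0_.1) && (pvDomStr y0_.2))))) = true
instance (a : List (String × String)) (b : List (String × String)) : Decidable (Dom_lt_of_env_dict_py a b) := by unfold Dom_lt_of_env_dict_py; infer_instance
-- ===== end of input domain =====

-- B replaces A's sort-all-keys-then-scan by a single min-selection pass over the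
-- distinguishing keys (alternative decomposition; return value only, no mutation).

-- ===== PORT A =====
-- 'for k in sorted(a.keys()): …'; the [] case is Python's unreachable 'assert False'
-- (excluded by Pre_, which demands the dicts differ)
def ltLoopA (da db : PySem.Dict String String) : List String → Bool
  | [] => false
  | k :: ks =>
    if db.contains k = false then true
    else if decide (da.getD k "" ≠ db.getD k "") then decide (da.getD k "" < db.getD k "")
    else ltLoopA da db ks

def lt_of_env_dict_py (a : List (String × String)) (b : List (String × String)) : Bool :=
  let da := PySem.Dict.ofList a
  let db := PySem.Dict.ofList b
  if da.size ≠ db.size then decide (da.size < db.size)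
  else ltLoopA da db (PySem.List.sorted da.keys (fun k => k) false)

-- ===== PORT B =====
def lt_of_env_dict_py_alt (a : List (String × String)) (b : List (String × String)) : Bool :=
  let da := PySem.Dict.ofList a
  let db := PySem.Dict.ofList b
  if da.size ≠ db.size then decide (da.size < db.size)
  else
    -- k = min(k for k in a if k not in b or a[k] != b[k]); the none case is
    -- Python's ValueError on an empty min (unreachable under Pre_)
    match PySem.List.min? (da.keys.filter
        (fun k => !db.contains k || decide (da.getD k "" ≠ db.getD k ""))) (fun k => k) with
    | none => false
    | some k => if !db.contains k then true else decide (da.getD k "" < db.getD k "")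

-- ===== PRECONDITION & SPEC =====
-- Pre_ excludes exactly the inputs whose two dicts are equal as mappings: there
-- Python's 'assert a != b' raises AssertionError (both in A and in B).
def Pre_lt_of_env_dict_py (a : List (String × String)) (b : List (String × String)) : Prop :=
  ¬ ((PySem.Dict.ofList a).size = (PySem.Dict.ofList b).size ∧
     ∀ k ∈ (PySem.Dict.ofList a).keys,
       (PySem.Dict.ofList a).get? k = (PySem.Dict.ofList b).get? k)
instance (a : List (String × String)) (b : List (String × String)) : Decidable (Pre_lt_of_env_dict_py a b) := by unfold Pre_lt_of_env_dict_py; infer_instance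

def pvWitness_lt_of_env_dict_py : (List (String × String)) × (List (String × String)) :=
  ([("PATH", "/bin")], [])

def Spec_lt_of_env_dict_py (a : List (String × String)) (b : List (String × String)) (out : Bool) : Prop := out = lt_of_env_dict_py_alt a b
instance (a : List (String × String)) (b : List (String × String)) (out : Bool) : Decidable (Spec_lt_of_env_dict_py a b out) := by unfold Spec_lt_of_env_dict_py; infer_instance

-- ===== CLAIM (what is proved, stated in full; the proofs are below) =====
def Claim_equal_lt_of_env_dict_py : Prop := ∀ (a : List (String × String)) (b : List (String × String)), Dom_lt_of_env_dict_py a b → Pre_lt_of_env_dict_py a b → Spec_lt_of_env_dict_py a b (lt_of_env_dict_py a b)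

-- ===== LEMMAS AND PROOFS =====

-- A's loop returns the verdict of the FIRST key of its list that distinguishes the dicts
theorem ltLoopA_eq_head_filter (da db : PySem.Dict String String) (l : List String) :
    ltLoopA da db l =
      match (l.filter (fun k => !db.contains k || decide (da.getD k "" ≠ db.getD k ""))).head? with
      | none => false
      | some k => if !db.contains k then true else decide (da.getD k "" < db.getD k "") := by
  induction l with
  | nil => rfl
  | cons k ks ih =>
    by_cases hc : db.contains k = false
    · simp [ltLoopA, List.filter_cons, hc]
    · by_cases hv : da.getD k "" = db.getD k ""
      · simp [ltLoopA, List.filter_cons, hc, hv, ih]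
      · simp [ltLoopA, hc, hv]

-- the first satisfying key of the sorted list is the minimum of the satisfying keys
theorem head_filter_sorted_eq_min (l : List String) (p : String → Bool) :
    ((PySem.List.sorted l (fun k => k) false).filter p).head? =
      PySem.List.min? (l.filter p) (fun k => k) := by
  cases hmin : PySem.List.min? (l.filter p) (fun k => k) with
  | none =>
    have h0 : l.filter p = [] := (PySem.List.min?_eq_none_iff _ _).mp hmin
    have : (PySem.List.sorted l (fun k => k) false).filter p = [] := by
      rw [List.filter_eq_nil_iff] at h0 ⊢
      intro x hx
      exact h0 x ((PySem.List.mem_sorted _ _ _ _).mp hx)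
    simp [this]
  | some m =>
    have hmmem : m ∈ l.filter p := PySem.List.min?_mem hmin
    have hmin' : ∀ y ∈ l.filter p, m ≤ y := PySem.List.min?_isMin hmin
    have hml : m ∈ l := (List.mem_filter.mp hmmem).1
    have hpm : p m = true := (List.mem_filter.mp hmmem).2
    have hms : m ∈ (PySem.List.sorted l (fun k => k) false).filter p :=
      List.mem_filter.mpr ⟨(PySem.List.mem_sorted _ _ _ _).mpr hml, hpm⟩
    obtain ⟨h, t, hht⟩ := List.exists_cons_of_ne_nil (List.ne_nil_of_mem hms)
    have hpair : ((PySem.List.sorted l (fun k => k) false).filter p).Pairwise (· ≤ ·) := by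
      exact List.Pairwise.filter p (PySem.List.sorted_pairwise l (fun k => k))
    have hhm : h ≤ m := by
      rw [hht] at hms hpair
      rcases List.mem_cons.mp hms with h1 | h1
      · exact le_of_eq h1.symm
      · exact (List.pairwise_cons.mp hpair).1 m h1
    have hhf : h ∈ l.filter p := by
      have : h ∈ (PySem.List.sorted l (fun k => k) false).filter p := by
        rw [hht]; exact List.mem_cons_self
      rcases List.mem_filter.mp this with ⟨hs, hp⟩
      exact List.mem_filter.mpr ⟨(PySem.List.mem_sorted _ _ _ _).mp hs, hp⟩
    have : h = m := le_antisymm hhm (hmin' h hhf)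
    rw [hht, this]
    rfl

-- ===== VERDICT (by name: the statement is the Claim_ definition above) =====
theorem lt_of_env_dict_py_spec : Claim_equal_lt_of_env_dict_py := by
  intro a b _hDom _hPre
  unfold Spec_lt_of_env_dict_py lt_of_env_dict_py lt_of_env_dict_py_alt
  simp only
  split
  · rfl
  · rw [ltLoopA_eq_head_filter, head_filter_sorted_eq_min]
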